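-- pv_equiv track=rewrite | github.com/Annabennaim/multi_asset_fund | code_scr/data_collector.py | get_client_seniority
-- ===== SOURCE A (Python) =====
-- def get_client_seniority(client_investment):
--     # Définition des niveaux de séniorité en fonction du montant investi
--     seniority_levels = {
--         "Junior": (1000, 100000),
--         "Mid-level": (100000, 500000),
--         "Senior": (500000, 1000000)
--     }
--
--     # Trouver le niveau de séniorité correspondant
--     client_seniority = None
--     for level, (min_amount, max_amount) in seniority_levels.items():
--         if min_amount <= client_investment < max_amount:
--             client_seniority = level
--             return client_seniority
-- ===== SOURCE B (Python) =====
-- def get_client_seniority(client_investment):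
--     # Binary search over sorted boundary table instead of scanning ranges.
--     boundaries = [1000, 100000, 500000, 1000000]
--     labels = [None, "Junior", "Mid-level", "Senior", None]
--     lo, hi = 0, len(boundaries)
--     while lo < hi:
--         mid = (lo + hi) // 2
--         if client_investment < boundaries[mid]:
--             hi = mid
--         else:
--             lo = mid + 1
--     return labels[lo]
-- ===== Notes on version B (the rewrite author's own statement) =====
-- stated objective: idiomatic
-- what changed: Replaced the linear scan over (level, (min, max)) range pairs with a bisect-right binary search into a sorted boundary table with a parallel label table.
import Mathlib
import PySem

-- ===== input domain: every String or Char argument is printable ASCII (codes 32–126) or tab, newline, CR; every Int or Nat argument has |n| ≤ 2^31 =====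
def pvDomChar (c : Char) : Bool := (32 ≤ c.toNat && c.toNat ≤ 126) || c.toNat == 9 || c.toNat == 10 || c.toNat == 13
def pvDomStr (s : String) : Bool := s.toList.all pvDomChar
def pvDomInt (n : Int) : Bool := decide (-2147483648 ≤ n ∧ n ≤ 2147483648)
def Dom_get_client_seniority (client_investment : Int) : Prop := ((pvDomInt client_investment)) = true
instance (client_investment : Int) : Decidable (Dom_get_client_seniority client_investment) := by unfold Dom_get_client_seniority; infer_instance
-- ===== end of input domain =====

-- B replaces A's linear scan over range pairs by a bisect-right binary search into a sorted boundary table (idiomatic lookup-table form).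


-- ===== PORT A =====
-- A's for-loop over the dict items with early return
def pvFindLevel (client_investment : Int) : List (String × Int × Int) → Option String
  | [] => none
  | (level, min_amount, max_amount) :: rest =>
      if min_amount ≤ client_investment ∧ client_investment < max_amount then
        some level
      else pvFindLevel client_investment rest

def get_client_seniority (client_investment : Int) : Option String :=
  let seniority_levels : List (String × Int × Int) :=
    [("Junior", 1000, 100000), ("Mid-level", 100000, 500000), ("Senior", 500000, 1000000)]
  pvFindLevel client_investment seniority_levels

-- ===== PORT B =====
-- B's while-loop binary search (bisect_right)
def pvBisectRight (xs : List Int) (x : Int) (lo hi : Nat) : Nat :=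
  if lo < hi then
    let mid := (lo + hi) / 2
    if x < xs.getD mid 0 then pvBisectRight xs x lo mid
    else pvBisectRight xs x (mid + 1) hi
  else lo
termination_by hi - lo
decreasing_by all_goals omega

def get_client_seniority_alt (client_investment : Int) : Option String :=
  let boundaries : List Int := [1000, 100000, 500000, 1000000]
  let labels : List (Option String) := [none, some "Junior", some "Mid-level", some "Senior", none]
  let i := pvBisectRight boundaries client_investment 0 boundaries.length
  labels.getD i none

-- ===== PRECONDITION & SPEC =====
def Spec_get_client_seniority (client_investment : Int) (out : Option String) : Prop := out = get_client_seniority_alt client_investment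
instance (client_investment : Int) (out : Option String) : Decidable (Spec_get_client_seniority client_investment out) := by unfold Spec_get_client_seniority; infer_instance

-- ===== CLAIM (what is proved, stated in full; the proofs are below) =====
def Claim_equal_get_client_seniority : Prop := ∀ (client_investment : Int), Dom_get_client_seniority client_investment → Spec_get_client_seniority client_investment (get_client_seniority client_investment)

-- ===== LEMMAS AND PROOFS =====
lemma pvBisectRight_boundaries (c : Int) :
    pvBisectRight [1000, 100000, 500000, 1000000] c 0 4 =
      if c < 1000 then 0 else if c < 100000 then 1 else if c < 500000 then 2
      else if c < 1000000 then 3 else 4 := by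
  rw [pvBisectRight.eq_def]; norm_num [List.getD]
  by_cases h3 : c < 500000
  · rw [if_pos h3, pvBisectRight.eq_def]; norm_num [List.getD]
    by_cases h2 : c < 100000
    · rw [if_pos h2, pvBisectRight.eq_def]; norm_num [List.getD]
      by_cases h1 : c < 1000
      · rw [if_pos h1, pvBisectRight.eq_def]
        simp [h1]
      · rw [if_neg h1, pvBisectRight.eq_def]
        simp [h1, h2]
    · rw [if_neg h2, pvBisectRight.eq_def]
      have h1 : ¬ c < 1000 := by omega
      simp [h1, h2, h3]
  · rw [if_neg h3, pvBisectRight.eq_def]; norm_num [List.getD]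
    have h1 : ¬ c < 1000 := by omega
    have h2 : ¬ c < 100000 := by omega
    by_cases h4 : c < 1000000
    · rw [if_pos h4, pvBisectRight.eq_def]
      simp [h1, h2, h3, h4]
    · rw [if_neg h4, pvBisectRight.eq_def]
      simp [h1, h2, h3, h4]

-- ===== VERDICT (by name: the statement is the Claim_ definition above) =====
theorem get_client_seniority_spec : Claim_equal_get_client_seniority := by
  intro c _
  unfold Spec_get_client_seniority get_client_seniority get_client_seniority_alt
  simp only [pvFindLevel, List.length]
  rw [show ((0 : Nat) + 1 + 1 + 1 + 1) = 4 by rfl, pvBisectRight_boundaries]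
  split_ifs <;> first
    | rfl
    | (exfalso; omega)
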